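-- pv_equiv track=rewrite | github.com/psychologistgbi-beep/Agentura | apps/executive-cli/src/executive_cli/connectors/caldav.py | _unfold_ical_lines
-- ===== SOURCE A (Python) =====
-- def _unfold_ical_lines(calendar_data: str) -> list[str]:
--     raw_lines = calendar_data.replace("\r\n", "\n").replace("\r", "\n").split("\n")
--     unfolded: list[str] = []
--     for line in raw_lines:
--         if not line:
--             continue
--         if line[0] in {" ", "\t"} and unfolded:
--             unfolded[-1] += line[1:]
--         else:
--             unfolded.append(line)
--     return unfolded
-- ===== SOURCE B (Python) =====
-- def _unfold_ical_lines(calendar_data: str) -> list[str]: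
--     text = calendar_data.replace("\r\n", "\n").replace("\r", "\n")
--     lines = [line for line in text.split("\n") if line]
--     unfolded = "\n".join(lines).replace("\n ", "").replace("\n\t", "")
--     return unfolded.split("\n") if unfolded else []
-- ===== Notes on version B (the rewrite author's own statement) =====
-- stated objective: idiomatic
-- what changed: Replaces the per-line accumulator loop (append / mutate-last) by whole-string fold-marker removal: filter out blank lines, re-join the lines, delete every newline-plus-space and newline-plus-tab pair with str.replace, and split back into lines.
import Mathlib
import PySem

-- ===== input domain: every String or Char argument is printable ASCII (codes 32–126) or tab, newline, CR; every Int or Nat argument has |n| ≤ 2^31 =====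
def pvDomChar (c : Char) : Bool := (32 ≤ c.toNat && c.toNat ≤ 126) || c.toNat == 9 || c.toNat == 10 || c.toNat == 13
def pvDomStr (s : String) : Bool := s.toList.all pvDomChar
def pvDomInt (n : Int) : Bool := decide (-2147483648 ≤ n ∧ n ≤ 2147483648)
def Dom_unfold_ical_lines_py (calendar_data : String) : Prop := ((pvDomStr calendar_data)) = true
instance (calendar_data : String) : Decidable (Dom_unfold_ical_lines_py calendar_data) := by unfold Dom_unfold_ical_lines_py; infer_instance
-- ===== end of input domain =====

-- B unfolds folded iCal lines by whole-string fold-marker removal (drop blank lines, re-join with "\n",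
-- delete every "\n " and "\n\t" via str.replace, split back) instead of A's per-line accumulator loop;
-- objective: more idiomatic, same cost.

-- ===== PORT A =====
def unfold_ical_lines_py (calendar_data : String) : List String :=
  let raw_lines :=
    ((PySem.Str.split? (PySem.Str.replace (PySem.Str.replace calendar_data "\r\n" "\n") "\r" "\n") "\n").getD [])
  raw_lines.foldl (fun unfolded line =>
    if line = "" then unfolded
    else if (PySem.Str.pyGet? line 0 = some ' ' ∨ PySem.Str.pyGet? line 0 = some '\t') ∧ unfolded ≠ [] then
      unfolded.dropLast ++ [unfolded.getLastD "" ++ PySem.Str.slice line (some 1) none]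
    else unfolded ++ [line]) []

-- ===== PORT B =====
def unfold_ical_lines_py_alt (calendar_data : String) : List String :=
  let text := PySem.Str.replace (PySem.Str.replace calendar_data "\r\n" "\n") "\r" "\n"
  let lines := ((PySem.Str.split? text "\n").getD []).filter (fun line => line ≠ "")
  let unfolded := PySem.Str.replace (PySem.Str.replace (PySem.Str.join "\n" lines) "\n " "") "\n\t" ""
  if unfolded = "" then [] else (PySem.Str.split? unfolded "\n").getD []

-- ===== PRECONDITION & SPEC =====
def Spec_unfold_ical_lines_py (calendar_data : String) (out : List String) : Prop := out = unfold_ical_lines_py_alt calendar_data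
instance (calendar_data : String) (out : List String) : Decidable (Spec_unfold_ical_lines_py calendar_data out) := by unfold Spec_unfold_ical_lines_py; infer_instance

-- ===== CLAIM (what is proved, stated in full; the proofs are below) =====
def Claim_equal_unfold_ical_lines_py : Prop := ∀ (calendar_data : String), Dom_unfold_ical_lines_py calendar_data → Spec_unfold_ical_lines_py calendar_data (unfold_ical_lines_py calendar_data)

-- ===== LEMMAS AND PROOFS =====

-- `split1 s` = s.split("\n") at the char-list level.
def split1 : List Char → List (List Char)
  | [] => [[]]
  | c :: t =>
    if c = '\n' then [] :: split1 t
    else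
      match split1 t with
      | [] => [[c]]
      | p :: ps => (c :: p) :: ps

def mapFirst (f : List Char → List Char) : List (List Char) → List (List Char)
  | [] => []
  | a :: as => f a :: as

-- `rep x s` = s.replace("\n" + x, "") (one left-to-right pass).
def rep (x : Char) : List Char → List Char
  | [] => []
  | [c] => [c]
  | c :: d :: t => if c = '\n' ∧ d = x then rep x t else c :: rep x (d :: t)

-- merge loop: a line whose head is x is a continuation of the previous line
def mgo (x : Char) (cur : List Char) : List (List Char) → List (List Char)
  | [] => [cur]
  | m :: ms => if m.head? = some x then mgo x (cur ++ m.tail) ms else cur :: mgo x m ms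

def mergeBy (x : Char) : List (List Char) → List (List Char)
  | [] => []
  | l :: ls => mgo x l ls

-- one-pass merge on both fold markers (A's loop; the first line is never a continuation)
def mgo2 (cur : List Char) : List (List Char) → List (List Char)
  | [] => [cur]
  | m :: ms =>
    if m.head? = some ' ' ∨ m.head? = some '\t' then mgo2 (cur ++ m.tail) ms
    else cur :: mgo2 m ms

def merge2 : List (List Char) → List (List Char)
  | [] => []
  | l :: ls => mgo2 l ls

-- A's loop body at the char level
def stepC (acc : List (List Char)) (l : List Char) : List (List Char) :=
  if l = [] then acc
  else if (l.head? = some ' ' ∨ l.head? = some '\t') ∧ acc ≠ [] then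
    acc.dropLast ++ [acc.getLastD [] ++ l.tail]
  else acc ++ [l]

-- "\n".join at the char level
def Jn : List (List Char) → List Char
  | [] => []
  | [l] => l
  | l :: ls@(_ :: _) => l ++ '\n' :: Jn ls

def Jtail : List (List Char) → List Char
  | [] => []
  | ls@(_ :: _) => '\n' :: Jn ls

theorem Jn_cons (a : List Char) (ls : List (List Char)) : Jn (a :: ls) = a ++ Jtail ls := by
  cases ls <;> simp [Jn, Jtail]

theorem Jtail_of_ne_nil {ls : List (List Char)} (h : ls ≠ []) : Jtail ls = '\n' :: Jn ls := by
  cases ls with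
  | nil => exact absurd rfl h
  | cons a as => rfl

theorem Jn_eq_intercalate (ls : List (List Char)) : List.intercalate ['\n'] ls = Jn ls := by
  induction ls with
  | nil => simp [Jn, List.intercalate]
  | cons a ls ih =>
    cases ls with
    | nil => simp [Jn, List.intercalate]
    | cons b ls' =>
      rw [Jn, ← ih]
      simp [List.intercalate, List.intersperse]

-- ---- split1 ----

theorem split1_ne_nil (s : List Char) : split1 s ≠ [] := by
  induction s with
  | nil => simp [split1]
  | cons c t ih =>
    simp only [split1]
    split
    · simp
    · cases h : split1 t with
      | nil => simp
      | cons p ps => simp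

theorem split1_cons_ne {c : Char} (t : List Char) (hc : c ≠ '\n') :
    split1 (c :: t) = mapFirst (c :: ·) (split1 t) := by
  simp only [split1, if_neg hc]
  cases h : split1 t with
  | nil => exact absurd h (split1_ne_nil t)
  | cons p ps => simp [mapFirst]

theorem mem_split1_no_nl (s : List Char) : ∀ p ∈ split1 s, '\n' ∉ p := by
  induction s with
  | nil => simp [split1]
  | cons c t ih =>
    by_cases hc : c = '\n'
    · subst hc
      simp only [split1, if_pos]
      intro p hp
      rcases List.mem_cons.mp hp with hp | hp
      · simp [hp]
      · exact ih p hp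
    · rw [split1_cons_ne t hc]
      cases h : split1 t with
      | nil => exact absurd h (split1_ne_nil t)
      | cons p ps =>
        intro q hq
        rcases List.mem_cons.mp hq with hq | hq
        · subst hq
          intro hmem
          rcases List.mem_cons.mp hmem with h' | h'
          · exact hc h'.symm
          · exact ih p (h ▸ List.mem_cons_self ..) h'
        · exact ih q (h ▸ List.mem_cons_of_mem _ hq)

theorem mapFirst_comp (f g : List Char → List Char) (ls : List (List Char)) :
    mapFirst f (mapFirst g ls) = mapFirst (f ∘ g) ls := by
  cases ls <;> simp [mapFirst]

theorem split1_append (a s : List Char) (h : '\n' ∉ a) :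
    split1 (a ++ s) = mapFirst (a ++ ·) (split1 s) := by
  induction a with
  | nil =>
    cases h' : split1 s with
    | nil => exact absurd h' (split1_ne_nil s)
    | cons p ps => simp [h', mapFirst]
  | cons c a' ih =>
    have hc : c ≠ '\n' := by intro hh; exact h (by simp [hh])
    have ha' : '\n' ∉ a' := fun hh => h (List.mem_cons_of_mem _ hh)
    rw [List.cons_append, split1_cons_ne _ hc, ih ha', mapFirst_comp]
    cases hs : split1 s with
    | nil => exact absurd hs (split1_ne_nil s)
    | cons p ps => simp [mapFirst]

theorem split1_Jn (ls : List (List Char)) (hne : ls ≠ []) (h : ∀ l ∈ ls, '\n' ∉ l) :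
    split1 (Jn ls) = ls := by
  induction ls with
  | nil => exact absurd rfl hne
  | cons l ls ih =>
    cases ls with
    | nil =>
      rw [show Jn [l] = l ++ [] from by simp [Jn], split1_append _ _ (h l (by simp))]
      simp [split1, mapFirst]
    | cons m ms =>
      rw [Jn, split1_append _ _ (h l (by simp))]
      rw [show split1 ('\n' :: Jn (m :: ms)) = [] :: split1 (Jn (m :: ms)) from by simp [split1]]
      rw [ih (by simp) (fun q hq => h q (List.mem_cons_of_mem _ hq))]
      simp [mapFirst]

theorem splitOn_go_eq (fuel : Nat) (s cur : List Char) (acc : List (List Char))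
    (h : s.length ≤ fuel) :
    PySem.Chars.splitOn.go ['\n'] fuel s cur acc =
      acc.reverse ++ mapFirst (cur.reverse ++ ·) (split1 s) := by
  induction fuel generalizing s cur acc with
  | zero =>
    have hs : s = [] := List.eq_nil_of_length_eq_zero (Nat.le_zero.mp h)
    subst hs
    rw [PySem.Chars.splitOn.go]
    simp [split1, mapFirst]
  | succ fuel ih =>
    cases s with
    | nil =>
      rw [PySem.Chars.splitOn.go]
      · simp [split1, mapFirst]
      · omega
    | cons c t =>
      rw [PySem.Chars.splitOn.go]
      by_cases hc : c = '\n'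
      · subst hc
        rw [if_pos (by simp [List.isPrefixOf])]
        rw [show List.drop (['\n'].length) ('\n' :: t) = t from rfl]
        rw [ih t [] _ (by simpa using Nat.le_of_succ_le_succ h)]
        cases hs : split1 t with
        | nil => exact absurd hs (split1_ne_nil t)
        | cons p ps => simp [split1, hs, mapFirst]
      · have hpre : ['\n'].isPrefixOf (c :: t) = false := by
          simp only [List.isPrefixOf, List.isPrefixOf_nil_left, Bool.and_true, beq_iff_eq]
          exact decide_eq_false (fun hh => hc hh.symm)
        rw [if_neg (by simp [hpre])]
        rw [ih t (c :: cur) acc (by simpa using Nat.le_of_succ_le_succ h)]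
        rw [split1_cons_ne t hc, mapFirst_comp]
        cases hs : split1 t with
        | nil => exact absurd hs (split1_ne_nil t)
        | cons p ps => simp [mapFirst]

theorem splitOn_eq_split1 (s : List Char) : PySem.Chars.splitOn s ['\n'] = split1 s := by
  rw [PySem.Chars.splitOn, splitOn_go_eq (s.length + 1) s [] [] (by omega)]
  cases hs : split1 s with
  | nil => exact absurd hs (split1_ne_nil s)
  | cons p ps => simp [mapFirst]

-- ---- rep ----

theorem rep_cons (x c : Char) (t : List Char) :
    rep x (c :: t) = if c = '\n' ∧ t.head? = some x then rep x (t.drop 1) else c :: rep x t := by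
  cases t with
  | nil => simp [rep]
  | cons d t' =>
    simp only [rep, List.head?_cons, List.drop_succ_cons, List.drop_zero, Option.some.injEq]

theorem rep_no_nl (x : Char) (s : List Char) (h : '\n' ∉ s) : rep x s = s := by
  induction s with
  | nil => rfl
  | cons c t ih =>
    rw [rep_cons, if_neg (fun hh => h (by simp [hh.1]))]
    rw [ih (fun hh => h (List.mem_cons_of_mem _ hh))]

theorem rep_boundary (x : Char) (a s : List Char) (h : '\n' ∉ a) :
    rep x (a ++ s) = a ++ rep x s := by
  induction a with
  | nil => rfl
  | cons c a' ih =>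
    have hc : c ≠ '\n' := fun hh => h (by simp [hh])
    rw [List.cons_append, rep_cons, if_neg (fun hh => hc hh.1),
      ih (fun hh => h (List.mem_cons_of_mem _ hh)), List.cons_append]

theorem replace_go_eq (x : Char) (fuel : Nat) (s acc : List Char) (h : s.length ≤ fuel) :
    PySem.Chars.replace.go ['\n', x] [] fuel s acc = acc.reverse ++ rep x s := by
  induction fuel generalizing s acc with
  | zero =>
    have hs : s = [] := List.eq_nil_of_length_eq_zero (Nat.le_zero.mp h)
    subst hs
    rw [PySem.Chars.replace.go]
    simp [rep]
  | succ fuel ih =>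
    cases s with
    | nil =>
      rw [PySem.Chars.replace.go]
      · simp [rep]
      · omega
    | cons c t =>
      rw [PySem.Chars.replace.go]
      by_cases hp : ['\n', x].isPrefixOf (c :: t) = true
      · rw [if_pos hp]
        cases t with
        | nil => simp [List.isPrefixOf] at hp
        | cons d t' =>
          simp only [List.isPrefixOf, List.isPrefixOf_nil_left, Bool.and_true, Bool.and_eq_true,
            beq_iff_eq] at hp
          obtain ⟨rfl, rfl⟩ : '\n' = c ∧ x = d := hp
          rw [show List.drop (['\n', x].length) ('\n' :: x :: t') = t' from rfl]
          rw [ih t' _ (by simp at h ⊢; omega)]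
          rw [rep_cons, if_pos (by simp)]
          simp
      · rw [if_neg hp]
        rw [ih t (c :: acc) (by simpa using Nat.le_of_succ_le_succ h)]
        rw [rep_cons]
        rw [if_neg (fun hh => by
          apply hp
          cases t with
          | nil => simp at hh
          | cons d t' =>
            simp only [List.head?_cons, Option.some.injEq] at hh
            simp [List.isPrefixOf, hh.1, hh.2])]
        simp

theorem replace_eq_rep (x : Char) (s : List Char) :
    PySem.Chars.replace s ['\n', x] [] = rep x s := by
  rw [PySem.Chars.replace, if_neg (by simp)]
  simpa using replace_go_eq x s.length s [] (le_refl _)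

-- ---- merge lemmas ----

theorem mgo_ne_nil (x : Char) (ms : List (List Char)) (cur : List Char) : mgo x cur ms ≠ [] := by
  induction ms generalizing cur with
  | nil => simp [mgo]
  | cons m ms ih =>
    simp only [mgo]
    split
    · exact ih _
    · simp

theorem mgo2_ne_nil (ms : List (List Char)) (cur : List Char) : mgo2 cur ms ≠ [] := by
  induction ms generalizing cur with
  | nil => simp [mgo2]
  | cons m ms ih =>
    simp only [mgo2]
    split
    · exact ih _
    · simp

theorem no_nl_tail {m : List Char} (h : '\n' ∉ m) : '\n' ∉ m.tail :=
  fun hh => h (List.mem_of_mem_tail hh)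

theorem mgo_inv (x : Char) (ms : List (List Char)) (cur : List Char)
    (hcur : cur ≠ [] ∧ '\n' ∉ cur) (hms : ∀ m ∈ ms, m ≠ [] ∧ '\n' ∉ m) :
    ∀ l ∈ mgo x cur ms, l ≠ [] ∧ '\n' ∉ l := by
  induction ms generalizing cur with
  | nil =>
    intro l hl
    simp only [mgo, List.mem_singleton] at hl
    subst hl; exact hcur
  | cons m ms ih =>
    intro l hl
    simp only [mgo] at hl
    split at hl
    · refine ih (cur ++ m.tail) ⟨by simp [hcur.1], ?_⟩
        (fun q hq => hms q (List.mem_cons_of_mem _ hq)) l hl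
      intro hh
      rcases List.mem_append.mp hh with hh | hh
      · exact hcur.2 hh
      · exact no_nl_tail (hms m (by simp)).2 hh
    · rcases List.mem_cons.mp hl with hl | hl
      · subst hl; exact hcur
      · exact ih m (hms m (by simp)) (fun q hq => hms q (List.mem_cons_of_mem _ hq)) l hl

theorem mgo2_inv (ms : List (List Char)) (cur : List Char)
    (hcur : cur ≠ [] ∧ '\n' ∉ cur) (hms : ∀ m ∈ ms, m ≠ [] ∧ '\n' ∉ m) :
    ∀ l ∈ mgo2 cur ms, l ≠ [] ∧ '\n' ∉ l := by
  induction ms generalizing cur with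
  | nil =>
    intro l hl
    simp only [mgo2, List.mem_singleton] at hl
    subst hl; exact hcur
  | cons m ms ih =>
    intro l hl
    simp only [mgo2] at hl
    split at hl
    · refine ih (cur ++ m.tail) ⟨by simp [hcur.1], ?_⟩
        (fun q hq => hms q (List.mem_cons_of_mem _ hq)) l hl
      intro hh
      rcases List.mem_append.mp hh with hh | hh
      · exact hcur.2 hh
      · exact no_nl_tail (hms m (by simp)).2 hh
    · rcases List.mem_cons.mp hl with hl | hl
      · subst hl; exact hcur
      · exact ih m (hms m (by simp)) (fun q hq => hms q (List.mem_cons_of_mem _ hq)) l hl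

-- rep x ("\n".join) merges exactly the x-continuation lines
theorem rep_Jn_go (x : Char) :
    ∀ (ms : List (List Char)) (cur : List Char), cur ≠ [] → '\n' ∉ cur →
      (∀ m ∈ ms, m ≠ [] ∧ '\n' ∉ m) →
      rep x (Jn (cur :: ms)) = Jn (mgo x cur ms) := by
  intro ms
  induction ms with
  | nil =>
    intro cur hc hnl _
    simp only [mgo, Jn]
    exact rep_no_nl x cur hnl
  | cons m ms ih =>
    intro cur hc hnl hms
    have hm := hms m (by simp)
    have hms' : ∀ q ∈ ms, q ≠ [] ∧ '\n' ∉ q := fun q hq => hms q (List.mem_cons_of_mem _ hq)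
    obtain ⟨a, t, rfl⟩ : ∃ a t, m = a :: t := by
      cases m with
      | nil => exact absurd rfl hm.1
      | cons a t => exact ⟨a, t, rfl⟩
    have hat : '\n' ∉ t := no_nl_tail hm.2
    rw [show Jn (cur :: (a :: t) :: ms) = cur ++ '\n' :: Jn ((a :: t) :: ms) from by
      rw [Jn_cons cur, Jtail_of_ne_nil (by simp)]]
    rw [rep_boundary x cur _ hnl]
    rw [Jn_cons (a :: t) ms]
    rw [show ('\n' :: ((a :: t) ++ Jtail ms)) = '\n' :: a :: (t ++ Jtail ms) from rfl]
    by_cases hax : a = x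
    · subst hax
      rw [show rep a ('\n' :: a :: (t ++ Jtail ms)) = rep a (t ++ Jtail ms) from by
        simp [rep]]
      rw [rep_boundary a t _ hat]
      rw [show mgo a cur ((a :: t) :: ms) = mgo a (cur ++ t) ms from by simp [mgo]]
      rw [← ih (cur ++ t) (by simp [hc]) (by
        intro hh
        rcases List.mem_append.mp hh with hh | hh
        · exact hnl hh
        · exact hat hh) hms']
      rw [Jn_cons (cur ++ t) ms, rep_boundary a _ _ (by
        intro hh
        rcases List.mem_append.mp hh with hh | hh
        · exact hnl hh
        · exact hat hh)]
      simp
    · rw [show rep x ('\n' :: a :: (t ++ Jtail ms)) = '\n' :: rep x (a :: (t ++ Jtail ms)) from by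
        simp [rep, hax]]
      rw [show (a :: (t ++ Jtail ms)) = ((a :: t) ++ Jtail ms) from rfl]
      rw [← Jn_cons (a :: t) ms]
      rw [ih (a :: t) (by simp) hm.2 hms']
      rw [show mgo x cur ((a :: t) :: ms) = cur :: mgo x (a :: t) ms from by simp [mgo, hax]]
      rw [Jn_cons cur, Jtail_of_ne_nil (mgo_ne_nil x ms (a :: t))]

theorem rep_Jn (x : Char) (ls : List (List Char)) (h : ∀ l ∈ ls, l ≠ [] ∧ '\n' ∉ l) :
    rep x (Jn ls) = Jn (mergeBy x ls) := by
  cases ls with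
  | nil => simp [Jn, mergeBy, rep]
  | cons l ls =>
    have hl := h l (by simp)
    exact rep_Jn_go x ls l hl.1 hl.2 (fun q hq => h q (List.mem_cons_of_mem _ hq))

-- two single-marker passes equal A's one combined pass
theorem merge_strength :
    ∀ (ms : List (List Char)) (cur m : List Char), m ≠ [] → (∀ n ∈ ms, n ≠ []) →
      mgo '\t' cur (mgo ' ' m ms) =
        if m.head? = some '\t' then mgo2 (cur ++ m.tail) ms else cur :: mgo2 m ms := by
  intro ms
  induction ms with
  | nil =>
    intro cur m hm _
    by_cases h : m.head? = some '\t' <;> simp [mgo, mgo2, h]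
  | cons n ns ih =>
    intro cur m hm hms
    have hn := hms n (by simp)
    have hns : ∀ q ∈ ns, q ≠ [] := fun q hq => hms q (List.mem_cons_of_mem _ hq)
    have hhead : (m ++ n.tail).head? = m.head? := by
      cases m with
      | nil => exact absurd rfl hm
      | cons a t => simp
    have htail : (m ++ n.tail).tail = m.tail ++ n.tail := by
      cases m with
      | nil => exact absurd rfl hm
      | cons a t => simp
    by_cases hsp : n.head? = some ' '
    · rw [show mgo ' ' m (n :: ns) = mgo ' ' (m ++ n.tail) ns from by simp [mgo, hsp]]
      rw [ih cur (m ++ n.tail) (by simp [hm]) hns, hhead, htail]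
      by_cases hmt : m.head? = some '\t'
      · simp [hmt, mgo2, hsp, List.append_assoc]
      · simp [hmt, mgo2, hsp]
    · rw [show mgo ' ' m (n :: ns) = m :: mgo ' ' n ns from by simp [mgo, hsp]]
      by_cases hmt : m.head? = some '\t'
      · rw [show mgo '\t' cur (m :: mgo ' ' n ns) = mgo '\t' (cur ++ m.tail) (mgo ' ' n ns) from by
          simp [mgo, hmt]]
        rw [ih (cur ++ m.tail) n hn hns]
        by_cases hnt : n.head? = some '\t'
        · simp [hmt, hnt, mgo2, hsp, List.append_assoc]
        · simp [hmt, hnt, mgo2, hsp]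
      · rw [show mgo '\t' cur (m :: mgo ' ' n ns) = cur :: mgo '\t' m (mgo ' ' n ns) from by
          simp [mgo, hmt]]
        rw [ih m n hn hns]
        by_cases hnt : n.head? = some '\t'
        · simp [hmt, hnt, mgo2, hsp]
        · simp [hmt, hnt, mgo2, hsp]

theorem mergeBy_tab_space :
    ∀ (ms : List (List Char)) (m : List Char), m ≠ [] → (∀ n ∈ ms, n ≠ []) →
      mergeBy '\t' (mgo ' ' m ms) = mgo2 m ms := by
  intro ms
  induction ms with
  | nil =>
    intro m hm _
    simp [mgo, mergeBy, mgo2]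
  | cons n ns ih =>
    intro m hm hms
    have hn := hms n (by simp)
    have hns : ∀ q ∈ ns, q ≠ [] := fun q hq => hms q (List.mem_cons_of_mem _ hq)
    by_cases hsp : n.head? = some ' '
    · rw [show mgo ' ' m (n :: ns) = mgo ' ' (m ++ n.tail) ns from by simp [mgo, hsp]]
      rw [ih (m ++ n.tail) (by simp [hm]) hns]
      simp [mgo2, hsp]
    · rw [show mgo ' ' m (n :: ns) = m :: mgo ' ' n ns from by simp [mgo, hsp]]
      rw [show mergeBy '\t' (m :: mgo ' ' n ns) = mgo '\t' m (mgo ' ' n ns) from rfl]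
      rw [merge_strength ns m n hn hns]
      by_cases hnt : n.head? = some '\t'
      · simp [mgo2, hsp, hnt]
      · simp [mgo2, hsp, hnt]

theorem merge2_eq_two_pass (ls : List (List Char)) (h : ∀ l ∈ ls, l ≠ []) :
    mergeBy '\t' (mergeBy ' ' ls) = merge2 ls := by
  cases ls with
  | nil => rfl
  | cons m ms =>
    exact mergeBy_tab_space ms m (h m (by simp)) (fun q hq => h q (List.mem_cons_of_mem _ hq))

-- ---- A's fold at the char level ----

theorem foldl_stepC_filter :
    ∀ (ls : List (List Char)) (acc : List (List Char)),
      List.foldl stepC acc ls = List.foldl stepC acc (ls.filter (fun l => !l.isEmpty)) := by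
  intro ls
  induction ls with
  | nil => intro acc; rfl
  | cons l ls ih =>
    intro acc
    by_cases hl : l = []
    · subst hl
      rw [List.foldl_cons, show stepC acc [] = acc from rfl]
      rw [ih acc]
      simp
    · rw [List.foldl_cons]
      rw [show (l :: ls).filter (fun l => !l.isEmpty) = l :: ls.filter (fun l => !l.isEmpty) from by
        rw [List.filter_cons_of_pos (by simpa using hl)]]
      rw [List.foldl_cons]
      exact ih (stepC acc l)

theorem foldl_stepC_mgo2 :
    ∀ (ls : List (List Char)) (acc : List (List Char)) (cur : List Char),
      (∀ l ∈ ls, l ≠ []) →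
      List.foldl stepC (acc ++ [cur]) ls = acc ++ mgo2 cur ls := by
  intro ls
  induction ls with
  | nil => intro acc cur _; simp [mgo2]
  | cons m ms ih =>
    intro acc cur hls
    have hm : m ≠ [] := hls m (by simp)
    have hms : ∀ l ∈ ms, l ≠ [] := fun q hq => hls q (List.mem_cons_of_mem _ hq)
    rw [List.foldl_cons]
    by_cases hcond : m.head? = some ' ' ∨ m.head? = some '\t'
    · rw [show stepC (acc ++ [cur]) m = acc ++ [cur ++ m.tail] from by
        simp [stepC, hm, hcond, List.dropLast_concat, List.getLastD_concat]]
      rw [ih acc (cur ++ m.tail) hms]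
      simp [mgo2, hcond]
    · rw [show stepC (acc ++ [cur]) m = (acc ++ [cur]) ++ [m] from by
        simp [stepC, hm, hcond]]
      rw [ih (acc ++ [cur]) m hms]
      simp [mgo2, hcond]

theorem foldl_stepC_merge2 (ls : List (List Char)) (h : ∀ l ∈ ls, l ≠ []) :
    List.foldl stepC [] ls = merge2 ls := by
  cases ls with
  | nil => rfl
  | cons m ms =>
    have hm : m ≠ [] := h m (by simp)
    rw [List.foldl_cons]
    rw [show stepC [] m = [] ++ [m] from by simp [stepC, hm]]
    exact foldl_stepC_mgo2 ms [] m (fun q hq => h q (List.mem_cons_of_mem _ hq))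

-- ---- lifting String ↔ List Char ----

theorem str_ext {a b : String} (h : a.toList = b.toList) : a = b := by
  rw [← String.ofList_toList (s := a), h, String.ofList_toList]

theorem pyGet0_ofList (l : List Char) : PySem.Str.pyGet? (String.ofList l) 0 = l.head? := by
  cases l with
  | nil => simp [PySem.Str.pyGet?, PySem.Chars.pyGet?, PySem.List.pyGet?, PySem.List.pyIdx?]
  | cons a t => simp [PySem.Str.pyGet?, PySem.Chars.pyGet?, PySem.List.pyGet?, PySem.List.pyIdx?]

theorem slice1_ofList (l : List Char) :
    PySem.Str.slice (String.ofList l) (some 1) none = String.ofList l.tail := by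
  apply str_ext
  rw [PySem.Str.toList_slice]
  simp [PySem.List.slice_from_one]

theorem getLastD_map_ofList :
    ∀ (acc : List (List Char)) (d : List Char),
      (acc.map String.ofList).getLastD (String.ofList d) = String.ofList (acc.getLastD d) := by
  intro acc
  induction acc with
  | nil => intro d; rfl
  | cons a t ih =>
    intro d
    rw [List.map_cons, List.getLastD_cons, List.getLastD_cons]
    exact ih a

theorem liftA :
    ∀ (ls accc : List (List Char)),
      List.foldl (fun unfolded line =>
        if line = "" then unfolded
        else if (PySem.Str.pyGet? line 0 = some ' ' ∨ PySem.Str.pyGet? line 0 = some '\t') ∧ unfolded ≠ [] then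
          unfolded.dropLast ++ [unfolded.getLastD "" ++ PySem.Str.slice line (some 1) none]
        else unfolded ++ [line]) (accc.map String.ofList) (ls.map String.ofList) =
      (List.foldl stepC accc ls).map String.ofList := by
  intro ls
  induction ls with
  | nil => intro accc; rfl
  | cons l ls ih =>
    intro accc
    rw [List.map_cons, List.foldl_cons, List.foldl_cons]
    have hstep :
        (if String.ofList l = "" then accc.map String.ofList
         else if (PySem.Str.pyGet? (String.ofList l) 0 = some ' ' ∨
                  PySem.Str.pyGet? (String.ofList l) 0 = some '\t') ∧ accc.map String.ofList ≠ [] then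
           (accc.map String.ofList).dropLast ++
             [(accc.map String.ofList).getLastD "" ++ PySem.Str.slice (String.ofList l) (some 1) none]
         else accc.map String.ofList ++ [String.ofList l]) = (stepC accc l).map String.ofList := by
      by_cases hl : l = []
      · subst hl
        simp [stepC]
      · rw [if_neg (by simpa using hl)]
        rw [pyGet0_ofList, slice1_ofList]
        by_cases hcond : (l.head? = some ' ' ∨ l.head? = some '\t') ∧ accc ≠ []
        · rw [if_pos (by simpa using hcond)]
          rw [show ("" : String) = String.ofList [] from rfl, getLastD_map_ofList]
          rw [show stepC accc l = accc.dropLast ++ [accc.getLastD [] ++ l.tail] from by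
            simp [stepC, hl, hcond.1, hcond.2]]
          simp [List.map_dropLast]
        · rw [if_neg (by simpa using hcond)]
          rw [show stepC accc l = accc ++ [l] from by
            simp only [stepC, if_neg hl]
            rw [if_neg hcond]]
          simp
    rw [hstep]
    exact ih (stepC accc l)

-- ---- final assembly ----

set_option maxHeartbeats 1000000 in
theorem unfold_ical_lines_py_spec' (s : String) :
    unfold_ical_lines_py s = unfold_ical_lines_py_alt s := by
  unfold unfold_ical_lines_py unfold_ical_lines_py_alt
  dsimp only
  set T : String := PySem.Str.replace (PySem.Str.replace s "\r\n" "\n") "\r" "\n" with hT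
  have hsplit : ∀ (u : String), (PySem.Str.split? u "\n").getD [] = (split1 u.toList).map String.ofList := by
    intro u
    rw [PySem.Str.split?, PySem.Chars.split?, if_neg (by simp)]
    rw [show ("\n" : String).toList = ['\n'] from rfl, splitOn_eq_split1]
    rfl
  rw [hsplit T]
  -- the char-level pieces
  set ps : List (List Char) := split1 T.toList with hps
  set lsC : List (List Char) := ps.filter (fun l => !l.isEmpty) with hlsC
  have hlsC_ne : ∀ l ∈ lsC, l ≠ [] := by
    intro l hl
    have := List.of_mem_filter hl
    simpa using this
  have hlsC_nl : ∀ l ∈ lsC, '\n' ∉ l := by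
    intro l hl
    exact mem_split1_no_nl T.toList l (List.mem_of_mem_filter hl)
  have hlsC_inv : ∀ l ∈ lsC, l ≠ [] ∧ '\n' ∉ l := fun l hl => ⟨hlsC_ne l hl, hlsC_nl l hl⟩
  -- A side
  have hA : (List.foldl (fun unfolded line =>
        if line = "" then unfolded
        else if (PySem.Str.pyGet? line 0 = some ' ' ∨ PySem.Str.pyGet? line 0 = some '\t') ∧ unfolded ≠ [] then
          unfolded.dropLast ++ [unfolded.getLastD "" ++ PySem.Str.slice line (some 1) none]
        else unfolded ++ [line]) [] (ps.map String.ofList)) = (merge2 lsC).map String.ofList := by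
    have h1 := liftA ps []
    simp only [List.map_nil] at h1
    rw [h1, foldl_stepC_filter ps [], ← hlsC, foldl_stepC_merge2 lsC hlsC_ne]
  rw [hA]
  -- B side
  have hfilter : (ps.map String.ofList).filter (fun line => line ≠ "") = lsC.map String.ofList := by
    rw [hlsC, List.filter_map]
    rw [show ((fun line => decide (line ≠ ("" : String))) ∘ String.ofList) = (fun l : List Char => !l.isEmpty) from by
      funext l
      by_cases h : l = [] <;> simp [Function.comp, h]]
  rw [hfilter]
  have hjoin : (PySem.Str.join "\n" (lsC.map String.ofList)).toList = Jn lsC := by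
    rw [PySem.Str.toList_join]
    rw [show ("\n" : String).toList = ['\n'] from rfl]
    rw [PySem.Chars.join]
    rw [List.map_map, show (String.toList ∘ String.ofList) = id from funext (fun l => String.toList_ofList), List.map_id]
    exact Jn_eq_intercalate lsC
  set M : List (List Char) := merge2 lsC with hM
  have hunf : (PySem.Str.replace (PySem.Str.replace (PySem.Str.join "\n" (lsC.map String.ofList)) "\n " "") "\n\t" "").toList = Jn M := by
    rw [PySem.Str.toList_replace, PySem.Str.toList_replace, hjoin]
    rw [show ("\n " : String).toList = ['\n', ' '] from rfl]
    rw [show ("\n\t" : String).toList = ['\n', '\t'] from rfl]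
    rw [show ("" : String).toList = [] from rfl]
    rw [replace_eq_rep ' ' (Jn lsC), rep_Jn ' ' lsC hlsC_inv]
    have hinv2 : ∀ l ∈ mergeBy ' ' lsC, l ≠ [] ∧ '\n' ∉ l := by
      cases hc : lsC with
      | nil => simp [mergeBy]
      | cons a as =>
        have ha := hlsC_inv a (hc ▸ List.mem_cons_self ..)
        exact fun l hl => mgo_inv ' ' as a ha
          (fun q hq => hlsC_inv q (hc ▸ List.mem_cons_of_mem _ hq)) l hl
    rw [replace_eq_rep '\t' _, rep_Jn '\t' _ hinv2]
    rw [merge2_eq_two_pass lsC hlsC_ne, hM]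
  by_cases hEmpty : lsC = []
  · have hMnil : M = [] := by rw [hM, hEmpty]; rfl
    have hcond : (PySem.Str.replace (PySem.Str.replace (PySem.Str.join "\n" (lsC.map String.ofList)) "\n " "") "\n\t" "") = "" := by
      apply str_ext
      rw [hunf, hMnil, show ("" : String).toList = ([] : List Char) from rfl]
      simp [Jn]
    rw [if_pos hcond, hMnil]
    rfl
  · obtain ⟨a, as, hls⟩ : ∃ a as, lsC = a :: as := by
      cases hc : lsC with
      | nil => exact absurd hc hEmpty
      | cons a as => exact ⟨a, as, rfl⟩
    have hMinv : ∀ l ∈ M, l ≠ [] ∧ '\n' ∉ l := by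
      rw [hM, hls]
      exact fun l hl => mgo2_inv as a (hlsC_inv a (hls ▸ List.mem_cons_self ..))
        (fun q hq => hlsC_inv q (hls ▸ List.mem_cons_of_mem _ hq)) l hl
    have hMne : M ≠ [] := by
      rw [hM, hls]
      exact mgo2_ne_nil as a
    have hJnM : Jn M ≠ [] := by
      obtain ⟨b, bs, hbbs⟩ : ∃ b bs, M = b :: bs := by
        cases hMM : M with
        | nil => exact absurd hMM hMne
        | cons b bs => exact ⟨b, bs, rfl⟩
      rw [hbbs, Jn_cons]
      have hb : b ≠ [] := (hMinv b (hbbs ▸ List.mem_cons_self ..)).1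
      intro hh
      exact hb (List.append_eq_nil_iff.mp hh).1
    have hne : (PySem.Str.replace (PySem.Str.replace (PySem.Str.join "\n" (lsC.map String.ofList)) "\n " "") "\n\t" "") ≠ "" := by
      intro hh
      apply hJnM
      rw [← hunf, hh]
      rfl
    rw [if_neg hne, hsplit _, hunf]
    rw [split1_Jn M hMne (fun l hl => (hMinv l hl).2)]

-- ===== VERDICT (by name: the statement is the Claim_ definition above) =====
theorem unfold_ical_lines_py_spec : Claim_equal_unfold_ical_lines_py := by
  intro s _
  exact unfold_ical_lines_py_spec' s
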